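-- pv_equiv track=rewrite | github.com/pwycl/IncrementalCoverage | script/plot.py | getTimeCoverage
-- ===== SOURCE A (Python) =====
-- def getTimeCoverage(TimeIndex: list, csv: list) -> dict:
--     def genCoverList(csvColIndex: int):
--         coverList = []
--         for time, index in TimeIndex:
--             if (index == -1):
--                 coverList.append( (time, 0) )
--             else:
--                 coverList.append( (time, csv[index][csvColIndex]) )
--         return coverList
--
--     branch = genCoverList(0)
--     instruction = genCoverList(1)
--     statement = genCoverList(2)
--     path = genCoverList(3)
--
--     res = {
--         "branch" : branch,
--         "instruction" : instruction,
--         "statement" : statement,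
--         # "path" : path
--     }
--
--     return res
-- ===== SOURCE B (Python) =====
-- def getTimeCoverage(TimeIndex: list, csv: list) -> dict:
--     # One pass over TimeIndex building all four columns at once (A scans it four times).
--     branch, instruction, statement, path = [], [], [], []
--     for time, index in TimeIndex:
--         if index == -1:
--             branch.append((time, 0))
--             instruction.append((time, 0))
--             statement.append((time, 0))
--             path.append((time, 0))
--         else:
--             row = csv[index]
--             branch.append((time, row[0]))
--             instruction.append((time, row[1]))
--             statement.append((time, row[2]))
--             path.append((time, row[3]))
--     return {"branch": branch, "instruction": instruction, "statement": statement}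
-- ===== Notes on version B (the rewrite author's own statement) =====
-- stated objective: alternative
-- what changed: Replaces A's four separate scans of TimeIndex (one helper call per column) with a single loop that appends to all four column lists at once; trades the per-column helper for a fused pass.
import Mathlib
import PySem

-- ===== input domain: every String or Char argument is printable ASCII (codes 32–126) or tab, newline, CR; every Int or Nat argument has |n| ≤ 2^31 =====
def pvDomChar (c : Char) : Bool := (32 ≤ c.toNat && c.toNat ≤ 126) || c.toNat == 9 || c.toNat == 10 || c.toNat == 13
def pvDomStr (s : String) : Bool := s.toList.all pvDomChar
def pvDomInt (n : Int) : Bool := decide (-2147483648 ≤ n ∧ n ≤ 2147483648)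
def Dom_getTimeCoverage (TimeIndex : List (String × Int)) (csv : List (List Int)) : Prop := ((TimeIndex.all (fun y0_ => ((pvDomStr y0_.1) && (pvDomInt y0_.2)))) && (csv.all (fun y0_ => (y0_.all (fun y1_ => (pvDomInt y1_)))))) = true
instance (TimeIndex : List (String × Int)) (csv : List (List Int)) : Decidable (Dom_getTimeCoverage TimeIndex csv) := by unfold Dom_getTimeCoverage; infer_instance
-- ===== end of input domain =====

-- ===== PORT A =====
-- A: builds each column by a separate helper call scanning TimeIndex (the unused
-- 'path' column is still computed, as in the Python). Header: B builds all four
-- columns in one pass over TimeIndex; same return value, and B also touches row[3]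
-- so it raises exactly where A does (those inputs are outside Pre_).
def genCoverList (TimeIndex : List (String × Int)) (csv : List (List Int)) (csvColIndex : Int) : List (String × Int) :=
  TimeIndex.foldl (fun coverList p =>
    if p.2 == -1 then coverList ++ [(p.1, (0 : Int))]
    else coverList ++ [(p.1, PySem.List.pyGetD (PySem.List.pyGetD csv p.2 []) csvColIndex 0)]) []

def getTimeCoverage (TimeIndex : List (String × Int)) (csv : List (List Int)) : List (String × List (String × Int)) :=
  let branch := genCoverList TimeIndex csv 0
  let instruction := genCoverList TimeIndex csv 1
  let statement := genCoverList TimeIndex csv 2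
  let _path := genCoverList TimeIndex csv 3
  [("branch", branch), ("instruction", instruction), ("statement", statement)]

-- ===== PORT B =====
def altStep (csv : List (List Int))
    (st : List (String × Int) × List (String × Int) × List (String × Int) × List (String × Int))
    (p : String × Int) :
    List (String × Int) × List (String × Int) × List (String × Int) × List (String × Int) :=
  match st with
  | (branch, instruction, statement, path) =>
    if p.2 == -1 then
      (branch ++ [(p.1, (0 : Int))], instruction ++ [(p.1, (0 : Int))],
       statement ++ [(p.1, (0 : Int))], path ++ [(p.1, (0 : Int))])
    else
      let row := PySem.List.pyGetD csv p.2 []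
      (branch ++ [(p.1, PySem.List.pyGetD row 0 0)], instruction ++ [(p.1, PySem.List.pyGetD row 1 0)],
       statement ++ [(p.1, PySem.List.pyGetD row 2 0)], path ++ [(p.1, PySem.List.pyGetD row 3 0)])

def getTimeCoverage_alt (TimeIndex : List (String × Int)) (csv : List (List Int)) : List (String × List (String × Int)) :=
  let r := TimeIndex.foldl (altStep csv) ([], [], [], [])
  [("branch", r.1), ("instruction", r.2.1), ("statement", r.2.2.1)]

-- ===== PRECONDITION & SPEC =====
-- Pre_ excludes exactly the inputs where the Python raises IndexError: some
-- TimeIndex entry with index ≠ -1 that is out of range for csv, or whose row has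
-- fewer than 4 columns (both A and B index row[3]).
def Pre_getTimeCoverage (TimeIndex : List (String × Int)) (csv : List (List Int)) : Prop :=
  ∀ p ∈ TimeIndex, p.2 ≠ -1 →
    PySem.Raise.InRange csv.length p.2 ∧ 4 ≤ (PySem.List.pyGetD csv p.2 []).length
instance (TimeIndex : List (String × Int)) (csv : List (List Int)) : Decidable (Pre_getTimeCoverage TimeIndex csv) := by unfold Pre_getTimeCoverage; infer_instance
def pvWitness_getTimeCoverage : (List (String × Int)) × List (List Int) :=
  ([("0", -1), ("1", 0), ("2", 1)], [[1, 2, 3, 4], [5, 6, 7, 8]])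

def Spec_getTimeCoverage (TimeIndex : List (String × Int)) (csv : List (List Int)) (out : List (String × List (String × Int))) : Prop := out = getTimeCoverage_alt TimeIndex csv
instance (TimeIndex : List (String × Int)) (csv : List (List Int)) (out : List (String × List (String × Int))) : Decidable (Spec_getTimeCoverage TimeIndex csv out) := by unfold Spec_getTimeCoverage; infer_instance

-- ===== CLAIM (what is proved, stated in full; the proofs are below) =====
def Claim_equal_getTimeCoverage : Prop := ∀ (TimeIndex : List (String × Int)) (csv : List (List Int)), Dom_getTimeCoverage TimeIndex csv → Pre_getTimeCoverage TimeIndex csv → Spec_getTimeCoverage TimeIndex csv (getTimeCoverage TimeIndex csv)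

-- ===== LEMMAS AND PROOFS =====
def covEntry (csv : List (List Int)) (col : Int) (p : String × Int) : String × Int :=
  if p.2 == -1 then (p.1, 0) else (p.1, PySem.List.pyGetD (PySem.List.pyGetD csv p.2 []) col 0)

theorem genCoverList_eq_map (TimeIndex : List (String × Int)) (csv : List (List Int)) (col : Int) :
    genCoverList TimeIndex csv col = TimeIndex.map (covEntry csv col) := by
  have h := PySem.List.foldl_append_singleton_eq_map (covEntry csv col) TimeIndex []
  unfold genCoverList
  rw [List.nil_append] at h
  rw [← h]
  congr 1
  funext acc p
  simp only [covEntry]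
  split <;> rfl

theorem alt_foldl (csv : List (List Int)) (TimeIndex : List (String × Int)) :
    ∀ b i s pa, TimeIndex.foldl (altStep csv) (b, i, s, pa) =
      (b ++ TimeIndex.map (covEntry csv 0), i ++ TimeIndex.map (covEntry csv 1),
       s ++ TimeIndex.map (covEntry csv 2), pa ++ TimeIndex.map (covEntry csv 3)) := by
  induction TimeIndex with
  | nil => simp
  | cons p tl ih =>
    intro b i s pa
    simp only [List.foldl_cons, List.map_cons, altStep, covEntry]
    split <;> simp [ih]

-- ===== VERDICT (by name: the statement is the Claim_ definition above) =====
theorem getTimeCoverage_spec : Claim_equal_getTimeCoverage := by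
  intro TimeIndex csv _ _
  unfold Spec_getTimeCoverage getTimeCoverage getTimeCoverage_alt
  simp [genCoverList_eq_map, alt_foldl]
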